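-- pv_equiv track=rewrite | github.com/natalka1122/advent_of_code | 2015/19/main2.py | f
-- ===== SOURCE A (Python) =====
-- def f(line: str, replacements: dict[str, set[str]]) -> str:
--     result = None
--     for index in range(len(line)):
--         for source, targets in replacements.items():
--             if line[index:].startswith(source):
--                 for target in targets:
--                     current = line[:index] + target + line[index + len(source) :]
--                     if result is None or len(current) < len(result):
--                         result = current
--     return result
-- ===== SOURCE B (Python) =====
-- def f(line: str, replacements: dict[str, set[str]]) -> str:
--     # Pass 1: minimum length delta over replacements whose source occurs in line.
--     best = None
--     for source, targets in replacements.items():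
--         if source in line:
--             for target in targets:
--                 delta = len(target) - len(source)
--                 if best is None or delta < best:
--                     best = delta
--     if best is None:
--         return None
--     # Pass 2: first candidate (in index, source, target order) achieving that delta.
--     for index in range(len(line)):
--         for source, targets in replacements.items():
--             if line[index:].startswith(source):
--                 for target in targets:
--                     if len(target) - len(source) == best:
--                         return line[:index] + target + line[index + len(source):]
--     return None
-- ===== Notes on version B (the rewrite author's own statement) =====
-- stated objective: faster
-- what changed: A builds every single-replacement candidate string and keeps a running shortest; B first computes the minimal length delta len(target)-len(source) over replacements whose source occurs in the line (no candidate built), then scans in the original (index, source, target) order and builds/returns only the first candidate achieving that delta.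
import Mathlib
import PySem

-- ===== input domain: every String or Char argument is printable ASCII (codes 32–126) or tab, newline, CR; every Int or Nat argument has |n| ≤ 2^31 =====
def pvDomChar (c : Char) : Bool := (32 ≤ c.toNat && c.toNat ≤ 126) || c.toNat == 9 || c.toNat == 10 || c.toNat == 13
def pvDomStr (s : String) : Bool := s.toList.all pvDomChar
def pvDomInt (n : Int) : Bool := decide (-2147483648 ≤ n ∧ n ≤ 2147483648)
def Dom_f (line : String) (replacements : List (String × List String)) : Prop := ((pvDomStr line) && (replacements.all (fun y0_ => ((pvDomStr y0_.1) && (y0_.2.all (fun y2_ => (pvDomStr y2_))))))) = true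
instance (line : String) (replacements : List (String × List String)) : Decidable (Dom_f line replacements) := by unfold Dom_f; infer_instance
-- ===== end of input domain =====

-- B replaces A's single scan that BUILDS every candidate string and keeps a running best
-- by two passes: first the minimal length delta over applicable replacements, then the first
-- candidate achieving it (only that one string is built); objective: alternative decomposition.
-- Strings are handled as char lists via PySem.Chars (exact; Lean's String ops are opaque).

-- ===== PORT A =====
def f (line : String) (replacements : List (String × List String)) : Option String :=
  let cs := line.toList
  ((PySem.List.pyRange 0 (cs.length : Int) 1).foldl (fun result index =>
    replacements.foldl (fun result p =>
      if PySem.Chars.startswith (PySem.List.slice cs (some index) none) p.1.toList then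
        p.2.foldl (fun result target =>
          let current := PySem.List.slice cs none (some index) ++ target.toList
              ++ PySem.List.slice cs (some (index + (p.1.toList.length : Int))) none
          match result with
          | none => some current
          | some r => if current.length < r.length then some current else some r) result
      else result) result) none).map String.ofList

-- ===== PORT B =====
-- pass 2 of Source B: nested loops with early return, innermost first
def fAltTargets (cs : List Char) (index : Int) (src : List Char) (b : Int) :
    List String → Option (List Char)
  | [] => none
  | t :: ts =>
      if (t.toList.length : Int) - (src.length : Int) = b then
        some (PySem.List.slice cs none (some index) ++ t.toList
              ++ PySem.List.slice cs (some (index + (src.length : Int))) none)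
      else fAltTargets cs index src b ts

def fAltReps (cs : List Char) (b : Int) (index : Int) :
    List (String × List String) → Option (List Char)
  | [] => none
  | p :: ps =>
      Option.or
        (if PySem.Chars.startswith (PySem.List.slice cs (some index) none) p.1.toList then
          fAltTargets cs index p.1.toList b p.2
        else none)
        (fAltReps cs b index ps)

def fAltSearch (cs : List Char) (b : Int) (reps : List (String × List String)) :
    List Int → Option (List Char)
  | [] => none
  | i :: is => Option.or (fAltReps cs b i reps) (fAltSearch cs b reps is)

-- pass 1 of Source B: minimum length delta over replacements whose source occurs in line
def fAltBest (cs : List Char) (replacements : List (String × List String)) : Option Int :=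
  replacements.foldl (fun best p =>
    if PySem.Chars.isIn p.1.toList cs then
      p.2.foldl (fun best target =>
        let delta : Int := (target.toList.length : Int) - (p.1.toList.length : Int)
        match best with
        | none => some delta
        | some b => if delta < b then some delta else some b) best
    else best) none

def f_alt (line : String) (replacements : List (String × List String)) : Option String :=
  let cs := line.toList
  match fAltBest cs replacements with
  | none => none
  | some b =>
      (fAltSearch cs b replacements (PySem.List.pyRange 0 (cs.length : Int) 1)).map String.ofList

-- ===== PRECONDITION & SPEC =====
def Spec_f (line : String) (replacements : List (String × List String)) (out : Option String) : Prop := out = f_alt line replacements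
instance (line : String) (replacements : List (String × List String)) (out : Option String) : Decidable (Spec_f line replacements out) := by unfold Spec_f; infer_instance

-- ===== CLAIM (what is proved, stated in full; the proofs are below) =====
def Claim_equal_f : Prop := ∀ (line : String) (replacements : List (String × List String)), Dom_f line replacements → Spec_f line replacements (f line replacements)

-- ===== LEMMAS AND PROOFS =====

-- "first element attaining the minimum of key k", right-recursive form
def fwmStep {β : Type} (k : β → Int) (u : Option β) (r : β) : Option β :=
  match u with
  | none => some r
  | some y => if k y < k r then some y else some r

def fwm {β : Type} (k : β → Int) : List β → Option β
  | [] => none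
  | x :: xs => fwmStep k (fwm k xs) x

-- the (delta, candidate) pairs produced at one index, in A's scan order
def itemsAt (cs : List Char) (reps : List (String × List String)) (i : Nat) :
    List (Int × List Char) :=
  reps.flatMap (fun p =>
    if PySem.Chars.startswith (cs.drop i) p.1.toList then
      p.2.map (fun t => ((t.toList.length : Int) - (p.1.toList.length : Int),
        cs.take i ++ t.toList ++ cs.drop (i + p.1.toList.length)))
    else [])

def items (cs : List Char) (reps : List (String × List String)) : List (Int × List Char) :=
  (List.range cs.length).flatMap (itemsAt cs reps)

-- the deltas enumerated by B's first pass
def deltas (cs : List Char) (reps : List (String × List String)) : List Int :=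
  reps.flatMap (fun p =>
    if PySem.Chars.isIn p.1.toList cs then
      p.2.map (fun t => (t.toList.length : Int) - (p.1.toList.length : Int))
    else [])

lemma foldl_ite_nil {α β : Type} (g : β → α → β) (acc : β) (c : Prop) [Decidable c]
    (l : List α) :
    List.foldl g acc (if c then l else []) = if c then List.foldl g acc l else acc := by
  split <;> rfl

lemma map_ite_nil {α β : Type} (g : α → β) (c : Prop) [Decidable c] (l : List α) :
    (if c then l else []).map g = if c then l.map g else [] := by
  split <;> rfl

lemma fwm_none_iff {β : Type} (k : β → Int) (xs : List β) : fwm k xs = none ↔ xs = [] := by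
  cases xs with
  | nil => simp [fwm]
  | cons x t =>
    simp only [fwm, fwmStep]
    cases h : fwm k t
    · simp
    · simp only []
      split <;> simp

lemma fwm_mem {β : Type} (k : β → Int) (xs : List β) (y : β) (h : fwm k xs = some y) :
    y ∈ xs := by
  induction xs with
  | nil => simp [fwm] at h
  | cons x t ih =>
    cases hf : fwm k t
    · simp only [fwm, fwmStep, hf] at h
      injection h with h'
      subst h'
      exact List.mem_cons_self
    · rename_i z
      simp only [fwm, fwmStep, hf] at h
      split at h <;> injection h with h' <;> subst h'
      · exact List.mem_cons_of_mem _ (ih hf)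
      · exact List.mem_cons_self

lemma fwm_le {β : Type} (k : β → Int) (xs : List β) (y : β) (h : fwm k xs = some y) :
    ∀ x ∈ xs, k y ≤ k x := by
  induction xs generalizing y with
  | nil => simp
  | cons x t ih =>
    cases hf : fwm k t
    · have ht : t = [] := (fwm_none_iff k t).mp hf
      subst ht
      simp only [fwm, fwmStep] at h
      injection h with h'
      subst h'
      simp
    · rename_i z
      simp only [fwm, fwmStep, hf] at h
      have hz := ih z hf
      intro x' hx'
      rcases List.mem_cons.mp hx' with rfl | hmem
      · split at h <;> injection h with h' <;> subst h' <;> omega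
      · have hx'' := hz x' hmem
        split at h <;> injection h with h' <;> subst h' <;> omega

lemma fwmStep_assoc {β : Type} (k : β → Int) (u : Option β) (c r : β) :
    fwmStep k u (if k c < k r then c else r) = fwmStep k (fwmStep k u c) r := by
  cases u with
  | none =>
    simp only [fwmStep]
    split <;> rfl
  | some y =>
    simp only [fwmStep]
    by_cases h1 : k c < k r <;> by_cases h2 : k y < k c
    · simp [h1, h2, show k y < k r by omega]
    · simp [h1, h2]
    · simp [h1, h2]
    · simp [h1, h2, show ¬ k y < k r by omega]

lemma foldl_fwm {β : Type} (k : β → Int) (xs : List β) (r : β) :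
    xs.foldl (fun r c => match r with
      | none => some c
      | some r' => if k c < k r' then some c else some r') (some r)
    = fwmStep k (fwm k xs) r := by
  induction xs generalizing r with
  | nil => simp [fwm, fwmStep]
  | cons c t ih =>
    simp only [List.foldl_cons]
    show t.foldl _ (if k c < k r then some c else some r) = _
    rw [← apply_ite some, ih]
    show fwmStep k (fwm k t) _ = _
    rw [fwmStep_assoc]
    rfl

lemma foldl_fwm_none {β : Type} (k : β → Int) (xs : List β) :
    xs.foldl (fun r c => match r with
      | none => some c
      | some r' => if k c < k r' then some c else some r') none = fwm k xs := by
  cases xs with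
  | nil => rfl
  | cons c t =>
    simp only [List.foldl_cons]
    show t.foldl _ (some c) = _
    rw [foldl_fwm]
    rfl

-- A computes the first minimum-length element of the candidate list
lemma f_eq_fwm (line : String) (reps : List (String × List String)) :
    f line reps
      = (fwm (fun c => (c.length : Int)) ((items line.toList reps).map (·.2))).map String.ofList := by
  unfold f
  simp only [PySem.List.pyRange_one]
  congr 1
  rw [← foldl_fwm_none]
  simp only [items, itemsAt, List.map_flatMap, map_ite_nil, List.map_map,
    List.foldl_flatMap, foldl_ite_nil, List.foldl_map, Nat.cast_lt]
  simp only [Int.sub_zero, Int.toNat_natCast, zero_add]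
  congr 1
  funext r i
  congr 1
  funext r' p
  by_cases hsw : PySem.Chars.startswith (PySem.List.slice line.toList (some (i : Int)) none) p.1.toList
  · rw [PySem.List.slice_from_natCast] at hsw
    rw [if_pos, if_pos hsw]
    · congr 1
      funext r'' t
      simp only [Function.comp, ← Nat.cast_add, PySem.List.slice_from_natCast,
        PySem.List.slice_to_natCast]
      cases r'' <;> rfl
    · rwa [PySem.List.slice_from_natCast]
  · rw [PySem.List.slice_from_natCast] at hsw
    rw [if_neg, if_neg hsw]
    rwa [PySem.List.slice_from_natCast]

-- B's first pass computes fwm over the deltas list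
lemma pass1_eq_fwm (cs : List Char) (reps : List (String × List String)) :
    fAltBest cs reps = fwm (fun d => d) (deltas cs reps) := by
  unfold fAltBest
  rw [← foldl_fwm_none]
  simp only [deltas, List.foldl_flatMap, foldl_ite_nil, List.foldl_map]
  congr 1
  funext best p
  by_cases hin : PySem.Chars.isIn p.1.toList cs
  · simp only [hin, if_true]
    congr 1
    funext o t
    cases o <;> rfl
  · simp [hin]

-- B's second pass is find? over the flattened items
lemma targets_eq_find (cs : List Char) (i : Nat) (s : String) (b : Int) (ts : List String) :
    fAltTargets cs (i : Int) s.toList b ts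
      = ((ts.map (fun t => ((t.toList.length : Int) - (s.toList.length : Int),
            cs.take i ++ t.toList ++ cs.drop (i + s.toList.length)))).find?
          (fun p => p.1 == b)).map (·.2) := by
  induction ts with
  | nil => rfl
  | cons t ts ih =>
    simp only [fAltTargets, List.map_cons, List.find?_cons]
    by_cases hd : (t.toList.length : Int) - (s.toList.length : Int) = b
    · rw [if_pos hd]
      have : ((t.toList.length : Int) - (s.toList.length : Int) == b) = true := beq_iff_eq.mpr hd
      rw [this]
      simp only [Option.map_some]
      congr 1
      simp only [← Nat.cast_add, PySem.List.slice_from_natCast, PySem.List.slice_to_natCast]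
    · rw [if_neg hd]
      have : ((t.toList.length : Int) - (s.toList.length : Int) == b) = false := by
        simpa using hd
      rw [this]
      exact ih

lemma reps_eq_find (cs : List Char) (i : Nat) (b : Int) (reps : List (String × List String)) :
    fAltReps cs b (i : Int) reps = ((itemsAt cs reps i).find? (fun p => p.1 == b)).map (·.2) := by
  induction reps with
  | nil => rfl
  | cons p ps ih =>
    simp only [fAltReps, itemsAt, List.flatMap_cons, List.find?_append]
    by_cases hsw : PySem.Chars.startswith (cs.drop i) p.1.toList
    · rw [if_pos hsw, if_pos (by rwa [PySem.List.slice_from_natCast])]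
      rw [targets_eq_find, ih, Option.map_or]
      rfl
    · rw [if_neg hsw, if_neg (by rwa [PySem.List.slice_from_natCast])]
      simp only [Option.none_or]
      exact ih

lemma search_eq_find (cs : List Char) (b : Int) (reps : List (String × List String))
    (is : List Nat) :
    fAltSearch cs b reps (is.map (fun (i : Nat) => (i : Int)))
      = ((is.flatMap (itemsAt cs reps)).find? (fun p => p.1 == b)).map (·.2) := by
  induction is with
  | nil => rfl
  | cons i is ih =>
    simp only [List.map_cons, fAltSearch, List.flatMap_cons, List.find?_append,
      Option.map_or, reps_eq_find, ih]

-- every candidate's length is line length plus its delta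
lemma items_length (cs : List Char) (reps : List (String × List String)) :
    ∀ p ∈ items cs reps, ((p.2.length : Int)) = (cs.length : Int) + p.1 := by
  intro p hp
  simp only [items, List.mem_flatMap, List.mem_range] at hp
  obtain ⟨i, hi, hp⟩ := hp
  simp only [itemsAt, List.mem_flatMap] at hp
  obtain ⟨q, _, hp⟩ := hp
  by_cases hsw : PySem.Chars.startswith (cs.drop i) q.1.toList
  · rw [if_pos hsw] at hp
    simp only [List.mem_map] at hp
    obtain ⟨t, _, rfl⟩ := hp
    have hpre : q.1.toList <+: cs.drop i := (PySem.Chars.startswith_iff _ _).mp hsw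
    have hle : q.1.toList.length ≤ cs.length - i := by
      have := hpre.length_le
      simpa [List.length_drop] using this
    simp only [List.length_append, List.length_take, List.length_drop]
    omega
  · rw [if_neg hsw] at hp
    simp at hp

-- every item's delta is enumerated by B's first pass
lemma items_delta_mem (cs : List Char) (reps : List (String × List String)) :
    ∀ p ∈ items cs reps, p.1 ∈ deltas cs reps := by
  intro p hp
  simp only [items, List.mem_flatMap, List.mem_range] at hp
  obtain ⟨i, hi, hp⟩ := hp
  simp only [itemsAt, List.mem_flatMap] at hp
  obtain ⟨q, hq, hp⟩ := hp
  by_cases hsw : PySem.Chars.startswith (cs.drop i) q.1.toList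
  · rw [if_pos hsw] at hp
    simp only [List.mem_map] at hp
    obtain ⟨t, ht, rfl⟩ := hp
    have hin : PySem.Chars.isIn q.1.toList cs = true := by
      rw [← PySem.Chars.exists_prefix_drop_iff_isIn]
      exact ⟨i, (PySem.Chars.startswith_iff _ _).mp hsw⟩
    simp only [deltas, List.mem_flatMap]
    exact ⟨q, hq, by rw [if_pos hin]; exact List.mem_map.mpr ⟨t, ht, rfl⟩⟩
  · rw [if_neg hsw] at hp
    simp at hp

-- conversely, on a nonempty line every enumerated delta is attained by some item
lemma deltas_mem_items (cs : List Char) (reps : List (String × List String)) (m : Int)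
    (hm : m ∈ deltas cs reps) (hcs : cs ≠ []) : m ∈ (items cs reps).map (·.1) := by
  simp only [deltas, List.mem_flatMap] at hm
  obtain ⟨q, hq, hm⟩ := hm
  by_cases hin : PySem.Chars.isIn q.1.toList cs
  · rw [if_pos hin] at hm
    simp only [List.mem_map] at hm
    obtain ⟨t, ht, rfl⟩ := hm
    obtain ⟨j, hj⟩ := (PySem.Chars.exists_prefix_drop_iff_isIn q.1.toList cs).mpr hin
    -- normalise the witness index to lie below cs.length
    obtain ⟨i, hilt, hpre⟩ : ∃ i, i < cs.length ∧ q.1.toList <+: cs.drop i := by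
      by_cases hjlt : j < cs.length
      · exact ⟨j, hjlt, hj⟩
      · have hdrop : cs.drop j = [] := List.drop_eq_nil_of_le (by omega)
        have hnil : q.1.toList = [] := List.prefix_nil.mp (hdrop ▸ hj)
        exact ⟨0, by cases cs <;> simp_all, by simp [hnil]⟩
    refine List.mem_map.mpr ⟨((t.toList.length : Int) - (q.1.toList.length : Int),
      cs.take i ++ t.toList ++ cs.drop (i + q.1.toList.length)), ?_, rfl⟩
    simp only [items, List.mem_flatMap, List.mem_range]
    refine ⟨i, hilt, ?_⟩
    simp only [itemsAt, List.mem_flatMap]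
    refine ⟨q, hq, ?_⟩
    rw [if_pos ((PySem.Chars.startswith_iff _ _).mpr hpre)]
    exact List.mem_map.mpr ⟨t, ht, rfl⟩
  · rw [if_neg hin] at hm
    simp at hm

-- the first minimum by length equals the first element whose delta is the lower bound m
lemma fwm_eq_find (K : Int) (m : Int) (l : List (Int × List Char))
    (h1 : ∀ p ∈ l, ((p.2.length : Int)) = K + p.1)
    (h2 : ∀ p ∈ l, m ≤ p.1)
    (h3 : l = [] ∨ m ∈ l.map (·.1)) :
    fwm (fun c => (c.length : Int)) (l.map (·.2)) = (l.find? (fun p => p.1 == m)).map (·.2) := by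
  induction l with
  | nil => rfl
  | cons p rest ih =>
    simp only [List.map_cons, fwm, List.find?_cons]
    by_cases hm : p.1 = m
    · rw [show (p.1 == m) = true from beq_iff_eq.mpr hm]
      cases hf : fwm (fun c => (c.length : Int)) (rest.map (·.2))
      · simp [fwmStep]
      · rename_i y
        obtain ⟨q, hq, rfl⟩ := List.mem_map.mp (fwm_mem _ _ _ hf)
        have hyq := h1 q (List.mem_cons_of_mem _ hq)
        have hmq := h2 q (List.mem_cons_of_mem _ hq)
        have hp1 := h1 p List.mem_cons_self
        simp only [fwmStep]
        rw [if_neg (by omega)]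
        simp
    · rw [show (p.1 == m) = false from beq_eq_false_iff_ne.mpr hm]
      have hmem : m ∈ rest.map (·.1) := by
        rcases h3 with h3 | h3
        · simp at h3
        · simp only [List.map_cons, List.mem_cons] at h3
          rcases h3 with h3 | h3
          · exact absurd h3.symm hm
          · exact h3
      have hrest : rest ≠ [] := by
        intro h; rw [h] at hmem; simp at hmem
      have ihe := ih (fun q hq => h1 q (List.mem_cons_of_mem _ hq))
        (fun q hq => h2 q (List.mem_cons_of_mem _ hq)) (Or.inr hmem)
      cases hf : fwm (fun c => (c.length : Int)) (rest.map (·.2))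
      · have := (fwm_none_iff _ _).mp hf
        simp only [List.map_eq_nil_iff] at this
        exact absurd this hrest
      · rename_i y
        -- y is at most K + m long, p.2 is strictly longer
        obtain ⟨q0, hq0, hq0m⟩ := List.mem_map.mp hmem
        have hy_le := fwm_le _ _ _ hf q0.2 (List.mem_map.mpr ⟨q0, hq0, rfl⟩)
        have hq0len := h1 q0 (List.mem_cons_of_mem _ hq0)
        have hp1 := h1 p List.mem_cons_self
        have hpm : m ≤ p.1 := h2 p List.mem_cons_self
        simp only [fwmStep]
        rw [if_pos (by omega)]
        rw [← hf, ihe]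

-- ===== VERDICT (by name: the statement is the Claim_ definition above) =====
theorem f_spec : Claim_equal_f := by
  intro line reps _hdom
  unfold Spec_f
  rw [f_eq_fwm]
  show _ = match fAltBest line.toList reps with
    | none => none
    | some b =>
        (fAltSearch line.toList b reps
          (PySem.List.pyRange 0 (line.toList.length : Int) 1)).map String.ofList
  rw [pass1_eq_fwm]
  cases hb : fwm (fun d => d) (deltas line.toList reps) with
  | none =>
    have hdel : deltas line.toList reps = [] := (fwm_none_iff _ _).mp hb
    have hitems : items line.toList reps = [] := by
      rw [List.eq_nil_iff_forall_not_mem]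
      intro p hp
      have := items_delta_mem _ _ p hp
      rw [hdel] at this
      simp at this
    rw [hitems]
    rfl
  | some b =>
    show Option.map String.ofList _ = Option.map String.ofList _
    rw [show PySem.List.pyRange 0 ((line.toList.length : Nat) : Int) 1
        = (List.range line.toList.length).map (fun (i : Nat) => (i : Int)) by
      simp [PySem.List.pyRange_one]]
    rw [search_eq_find]
    rw [show (List.range line.toList.length).flatMap (itemsAt line.toList reps)
        = items line.toList reps from rfl]
    have hmem := fwm_mem _ _ _ hb
    have hle := fwm_le _ _ _ hb
    congr 1
    apply fwm_eq_find (line.toList.length : Int)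
    · exact items_length _ _
    · intro p hp
      exact hle p.1 (items_delta_mem _ _ p hp)
    · by_cases hcs : line.toList = []
      · left; simp [items, hcs]
      · right; exact deltas_mem_items _ _ b hmem hcs
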